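-- pv_equiv track=rewrite | github.com/HendrikKuehne/belief_propagation | belief_propagation/utils.py | is_disjoint_layer
-- ===== SOURCE A (Python) =====
-- from typing import List, Dict, Tuple, FrozenSet, Callable
--
-- def is_disjoint_layer(
--         layer: Tuple[Dict[int, tuple]],
--         op_chain: Dict[int, tuple] = dict()
--     ) -> bool:
--     """
--     Tests if the set `op_chains` of operator chains is disjoint,
--     i.e. the operator chains in `op_chains` act on different sites.
--     If `op_chain` is given, tests if `op_chains` is disjoint upon
--     addition of `op_chain`.
--     """
--     new_sites = set(op_chain.keys())
--     for op_chain_ in layer: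
--         if len(new_sites & set(op_chain_.keys())) > 0: return False
--
--     return True
-- ===== SOURCE B (Python) =====
-- def is_disjoint_layer(layer, op_chain=dict()):
--     all_sites = set().union(*(c.keys() for c in layer))
--     return set(op_chain.keys()).isdisjoint(all_sites)
-- ===== Notes on version B (the rewrite author's own statement) =====
-- stated objective: simpler
-- what changed: B first builds one union set of every site occurring in any chain of the layer, then does a single disjointness test against op_chain's keys, instead of A's per-chain loop with repeated intersections and an early exit.
import Mathlib
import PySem

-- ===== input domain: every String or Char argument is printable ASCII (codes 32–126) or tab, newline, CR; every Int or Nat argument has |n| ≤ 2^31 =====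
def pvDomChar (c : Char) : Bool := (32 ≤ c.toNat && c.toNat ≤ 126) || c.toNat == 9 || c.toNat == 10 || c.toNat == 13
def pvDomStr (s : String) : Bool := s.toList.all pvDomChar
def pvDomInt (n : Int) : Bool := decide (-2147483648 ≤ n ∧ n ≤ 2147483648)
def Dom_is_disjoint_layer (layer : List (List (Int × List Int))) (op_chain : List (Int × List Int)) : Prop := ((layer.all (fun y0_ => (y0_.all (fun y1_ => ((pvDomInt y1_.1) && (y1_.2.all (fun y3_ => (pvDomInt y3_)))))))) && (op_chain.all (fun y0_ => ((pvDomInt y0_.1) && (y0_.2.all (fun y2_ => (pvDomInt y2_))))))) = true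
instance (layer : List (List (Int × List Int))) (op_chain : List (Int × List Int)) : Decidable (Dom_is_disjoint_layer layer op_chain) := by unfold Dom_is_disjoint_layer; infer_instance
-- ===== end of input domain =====

-- B builds one union set of all sites in the layer and does a single disjointness
-- test, instead of A's per-chain loop of intersections with early exit (objective: simpler).

-- ===== PORT A =====
-- the 'for op_chain_ in layer' loop with its early 'return False'
def isDisjointLoopA (new_sites : PySem.Set Int) : List (List (Int × List Int)) → Bool
  | [] => true
  | c :: rest =>
      if PySem.Set.len (PySem.Set.inter new_sites (PySem.Set.ofList (c.map Prod.fst))) > 0 then false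
      else isDisjointLoopA new_sites rest

def is_disjoint_layer (layer : List (List (Int × List Int))) (op_chain : List (Int × List Int)) : Bool :=
  let new_sites := PySem.Set.ofList (op_chain.map Prod.fst)
  isDisjointLoopA new_sites layer

-- ===== PORT B =====
def is_disjoint_layer_alt (layer : List (List (Int × List Int))) (op_chain : List (Int × List Int)) : Bool :=
  -- set().union(*(c.keys() for c in layer))
  let all_sites := layer.foldl (fun s c => PySem.Set.union s (c.map Prod.fst)) PySem.Set.empty
  PySem.Set.isdisjoint (PySem.Set.ofList (op_chain.map Prod.fst)) all_sites

-- ===== PRECONDITION & SPEC =====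
def Spec_is_disjoint_layer (layer : List (List (Int × List Int))) (op_chain : List (Int × List Int)) (out : Bool) : Prop := out = is_disjoint_layer_alt layer op_chain
instance (layer : List (List (Int × List Int))) (op_chain : List (Int × List Int)) (out : Bool) : Decidable (Spec_is_disjoint_layer layer op_chain out) := by unfold Spec_is_disjoint_layer; infer_instance

-- ===== CLAIM (what is proved, stated in full; the proofs are below) =====
def Claim_equal_is_disjoint_layer : Prop := ∀ (layer : List (List (Int × List Int))) (op_chain : List (Int × List Int)), Dom_is_disjoint_layer layer op_chain → Spec_is_disjoint_layer layer op_chain (is_disjoint_layer layer op_chain)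

-- ===== LEMMAS AND PROOFS =====
theorem loopA_eq_true_iff (ns : PySem.Set Int) (layer : List (List (Int × List Int))) :
    isDisjointLoopA ns layer = true ↔ ∀ c ∈ layer, ∀ x ∈ ns, x ∉ c.map Prod.fst := by
  induction layer with
  | nil => simp [isDisjointLoopA]
  | cons c rest ih =>
      simp only [isDisjointLoopA]
      split_ifs with h
      · simp only [false_iff]
        intro hall
        have : PySem.Set.len (PySem.Set.inter ns (PySem.Set.ofList (c.map Prod.fst))) ≤ 0 := by
          unfold PySem.Set.len
          have : PySem.Set.inter ns (PySem.Set.ofList (c.map Prod.fst)) = [] := by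
            rw [List.eq_nil_iff_forall_not_mem]
            intro x hx
            rw [PySem.Set.mem_inter] at hx
            exact hall c (List.mem_cons_self ..) x hx.1 ((PySem.Set.mem_ofList ..).1 hx.2)
          simp [this]
        omega
      · rw [ih]
        constructor
        · intro hall c' hc' x hx hxc'
          rcases List.mem_cons.1 hc' with rfl | hc'
          · apply h
            have hmem : x ∈ PySem.Set.inter ns (PySem.Set.ofList (c'.map Prod.fst)) := by
              rw [PySem.Set.mem_inter, PySem.Set.mem_ofList]; exact ⟨hx, hxc'⟩
            have := List.length_pos_of_mem hmem
            unfold PySem.Set.len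
            omega
          · exact hall c' hc' x hx hxc'
        · intro hall c' hc' x hx
          exact hall c' (List.mem_cons_of_mem _ hc') x hx

theorem mem_foldl_union (layer : List (List (Int × List Int))) (s : PySem.Set Int) (y : Int) :
    y ∈ layer.foldl (fun s c => PySem.Set.union s (c.map Prod.fst)) s ↔
      y ∈ s ∨ ∃ c ∈ layer, y ∈ c.map Prod.fst := by
  induction layer generalizing s with
  | nil => simp
  | cons c rest ih =>
      simp only [List.foldl_cons, ih, PySem.Set.mem_union, List.mem_cons]
      constructor
      · rintro ((h | h) | ⟨c', hc', h⟩)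
        · exact Or.inl h
        · exact Or.inr ⟨c, Or.inl rfl, h⟩
        · exact Or.inr ⟨c', Or.inr hc', h⟩
      · rintro (h | ⟨c', (rfl | hc'), h⟩)
        · exact Or.inl (Or.inl h)
        · exact Or.inl (Or.inr h)
        · exact Or.inr ⟨c', hc', h⟩

-- ===== VERDICT (by name: the statement is the Claim_ definition above) =====
theorem is_disjoint_layer_spec : Claim_equal_is_disjoint_layer := by
  intro layer op_chain _
  unfold Spec_is_disjoint_layer is_disjoint_layer is_disjoint_layer_alt
  rw [Bool.eq_iff_iff, loopA_eq_true_iff, PySem.Set.isdisjoint_iff]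
  constructor
  · intro hall x hx hmem
    rw [mem_foldl_union] at hmem
    rcases hmem with h | ⟨c, hc, h⟩
    · simp [PySem.Set.empty] at h
    · exact hall c hc x hx h
  · intro hdis c hc x hx hxc
    exact hdis x hx ((mem_foldl_union ..).2 (Or.inr ⟨c, hc, hxc⟩))
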